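-- pv_equiv track=rewrite | github.com/benjamin-swain/meltingpot-2023-solution | hard_code_clean_up.py | get_direction_to_goal
-- ===== SOURCE A (Python) =====
-- AGENT_VIEW_SIZE = 11
--
-- ACTIONS = {
--     "up": (-1, 0),
--     "down": (1, 0),
--     "left": (0, -1),
--     "right": (0, 1)
-- }
--
-- def get_neighbours(cell):
--     """ Return the neighbours of the cell in the grid """
--     i, j = cell
--     return [(i + di, j + dj) for di, dj in ACTIONS.values() if 0 <= i + di < AGENT_VIEW_SIZE and 0 <= j + dj < AGENT_VIEW_SIZE]
--
-- def shortest_path_to_goal(start, goal, walls, bad_cells):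
--     """ Compute the shortest path from start to goal avoiding walls and bad cells """
--     visited = set()
--     queue = [(start, [])]
--     while queue:
--         (i, j), path = queue.pop(0)
--         if (i, j) == goal:
--             return path
--         if (i, j) in visited:
--             continue
--         visited.add((i, j))
--         for neighbour in get_neighbours((i, j)):
--             if neighbour not in walls and neighbour not in bad_cells and neighbour not in visited:
--                 queue.append((neighbour, path + [neighbour]))
--     return []
--
-- def get_direction_to_goal(goal, walls, bad_cells):
--     start = (9, 5)
--     path = shortest_path_to_goal(start, goal, walls, bad_cells)
--     if not path:
--         return None
--     next_cell = path[0]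
--     for action, (di, dj) in ACTIONS.items():
--         if (start[0] + di, start[1] + dj) == next_cell:
--             return action
--     return None
-- ===== SOURCE B (Python) =====
-- AGENT_VIEW_SIZE = 11
--
-- ACTIONS = {
--     "up": (-1, 0),
--     "down": (1, 0),
--     "left": (0, -1),
--     "right": (0, 1)
-- }
--
-- def get_direction_to_goal(goal, walls, bad_cells):
--     # BFS that carries only the first move's action name, not a whole path.
--     start = (9, 5)
--     visited = set()
--     queue = [(start, None)]
--     while queue:
--         (i, j), first_action = queue.pop(0)
--         if (i, j) == goal:
--             return first_action
--         if (i, j) in visited: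
--             continue
--         visited.add((i, j))
--         for action, (di, dj) in ACTIONS.items():
--             n = (i + di, j + dj)
--             if 0 <= n[0] < AGENT_VIEW_SIZE and 0 <= n[1] < AGENT_VIEW_SIZE \
--                     and n not in walls and n not in bad_cells and n not in visited:
--                 queue.append((n, first_action if first_action is not None else action))
--     return None
-- ===== Notes on version B (the rewrite author's own statement) =====
-- stated objective: simpler
-- what changed: B's BFS queue carries only the first move's action name instead of a full path list per entry, so no paths are concatenated and the final ACTIONS lookup loop of A disappears; the answer is returned directly from the search.
import Mathlib
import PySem

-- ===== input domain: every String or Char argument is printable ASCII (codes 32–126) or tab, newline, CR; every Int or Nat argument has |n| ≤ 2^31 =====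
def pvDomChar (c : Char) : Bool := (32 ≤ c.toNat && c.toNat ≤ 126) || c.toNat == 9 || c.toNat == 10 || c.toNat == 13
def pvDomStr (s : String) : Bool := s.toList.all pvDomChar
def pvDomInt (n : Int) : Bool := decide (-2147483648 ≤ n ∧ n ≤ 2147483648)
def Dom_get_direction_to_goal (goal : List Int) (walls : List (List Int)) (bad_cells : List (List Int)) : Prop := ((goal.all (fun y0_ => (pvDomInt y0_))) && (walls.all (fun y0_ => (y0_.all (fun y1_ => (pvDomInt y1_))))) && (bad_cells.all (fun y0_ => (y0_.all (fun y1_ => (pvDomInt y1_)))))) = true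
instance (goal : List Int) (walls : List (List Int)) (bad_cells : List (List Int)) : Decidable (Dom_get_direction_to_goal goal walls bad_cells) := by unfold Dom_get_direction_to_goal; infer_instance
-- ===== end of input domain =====

-- B drops the per-entry path copies of A: its BFS queue carries only the first move's
-- action name, so no path lists are built and no final ACTIONS lookup is needed (objective: simpler).

-- ===== PORT A =====
def pvActions : List (String × (Int × Int)) :=
  [("up", (-1, 0)), ("down", (1, 0)), ("left", (0, -1)), ("right", (0, 1))]

def pvGetNeighbours (c : Int × Int) : List (Int × Int) :=
  (pvActions.map Prod.snd).filterMap (fun d =>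
    if 0 ≤ c.1 + d.1 ∧ c.1 + d.1 < 11 ∧ 0 ≤ c.2 + d.2 ∧ c.2 + d.2 < 11 then
      some (c.1 + d.1, c.2 + d.2) else none)

-- membership of a tuple cell in a Python set of tuples (set[tuple[int,...]] ↦ List (List Int))
def pvCellIn (n : Int × Int) (ls : List (List Int)) : Bool := ls.contains [n.1, n.2]

-- the while-loop of shortest_path_to_goal, fuel-bounded (fuel 1000 always suffices:
-- at most 1 + 4·121 entries are ever enqueued on the 11×11 grid)
def pvBfsA (goal : List Int) (walls bad_cells : List (List Int)) :
    Nat → List ((Int × Int) × List (Int × Int)) → PySem.Set (Int × Int) → List (Int × Int)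
  | 0, _, _ => []
  | _ + 1, [], _ => []
  | fuel + 1, (c, path) :: rest, visited =>
    if [c.1, c.2] = goal then path
    else if PySem.Set.contains visited c then pvBfsA goal walls bad_cells fuel rest visited
    else
      let visited' := PySem.Set.add visited c
      let entries :=
        ((pvGetNeighbours c).filter (fun n =>
            !pvCellIn n walls && !pvCellIn n bad_cells && !PySem.Set.contains visited' n)).map
          (fun n => (n, path ++ [n]))
      pvBfsA goal walls bad_cells fuel (rest ++ entries) visited'

def get_direction_to_goal (goal : List Int) (walls : List (List Int)) (bad_cells : List (List Int)) : Option String :=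
  let path := pvBfsA goal walls bad_cells 1000 [((9, 5), [])] PySem.Set.empty
  match path with
  | [] => none
  | next :: _ =>
    (pvActions.find? (fun ad => (9 : Int) + ad.2.1 = next.1 ∧ (5 : Int) + ad.2.2 = next.2)).map Prod.fst

-- ===== PORT B =====
def pvBfsB (goal : List Int) (walls bad_cells : List (List Int)) :
    Nat → List ((Int × Int) × Option String) → PySem.Set (Int × Int) → Option String
  | 0, _, _ => none
  | _ + 1, [], _ => none
  | fuel + 1, (c, first_action) :: rest, visited =>
    if [c.1, c.2] = goal then first_action
    else if PySem.Set.contains visited c then pvBfsB goal walls bad_cells fuel rest visited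
    else
      let visited' := PySem.Set.add visited c
      let entries := pvActions.filterMap (fun ad =>
        let n : Int × Int := (c.1 + ad.2.1, c.2 + ad.2.2)
        if (0 ≤ n.1 ∧ n.1 < 11 ∧ 0 ≤ n.2 ∧ n.2 < 11) ∧
            ¬ walls.contains [n.1, n.2] = true ∧ ¬ bad_cells.contains [n.1, n.2] = true ∧
            ¬ PySem.Set.contains visited' n = true then
          some (n, some (match first_action with | some s => s | none => ad.1))
        else none)
      pvBfsB goal walls bad_cells fuel (rest ++ entries) visited'

def get_direction_to_goal_alt (goal : List Int) (walls : List (List Int)) (bad_cells : List (List Int)) : Option String :=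
  pvBfsB goal walls bad_cells 1000 [(((9 : Int), (5 : Int)), none)] PySem.Set.empty

-- ===== PRECONDITION & SPEC =====
def Spec_get_direction_to_goal (goal : List Int) (walls : List (List Int)) (bad_cells : List (List Int)) (out : Option String) : Prop := out = get_direction_to_goal_alt goal walls bad_cells
instance (goal : List Int) (walls : List (List Int)) (bad_cells : List (List Int)) (out : Option String) : Decidable (Spec_get_direction_to_goal goal walls bad_cells out) := by unfold Spec_get_direction_to_goal; infer_instance

-- ===== CLAIM (what is proved, stated in full; the proofs are below) =====
def Claim_equal_get_direction_to_goal : Prop := ∀ (goal : List Int) (walls : List (List Int)) (bad_cells : List (List Int)), Dom_get_direction_to_goal goal walls bad_cells → Spec_get_direction_to_goal goal walls bad_cells (get_direction_to_goal goal walls bad_cells)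

-- ===== LEMMAS AND PROOFS =====

-- A's final lookup of a first cell among the four actions
def pvDirOf (next : Int × Int) : Option String :=
  (pvActions.find? (fun ad => (9 : Int) + ad.2.1 = next.1 ∧ (5 : Int) + ad.2.2 = next.2)).map Prod.fst

-- coupling between an A-queue entry and the corresponding B-queue entry
def pvR (ea : (Int × Int) × List (Int × Int)) (eb : (Int × Int) × Option String) : Prop :=
  eb.1 = ea.1 ∧
    ((ea.2 = [] ∧ ea.1 = ((9 : Int), (5 : Int)) ∧ eb.2 = none) ∨
     (∃ h t, ea.2 = h :: t ∧ eb.2 = pvDirOf h ∧ (pvDirOf h).isSome))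

theorem pv_bool_iff {b1 b2 b3 : Bool} :
    (!b1 && !b2 && !b3) = true ↔ (¬ b1 = true ∧ ¬ b2 = true ∧ ¬ b3 = true) := by
  cases b1 <;> cases b2 <;> cases b3 <;> simp

theorem pv_forall2_filterMap {α β γ : Type} (f : α → Option β) (g : α → Option γ)
    (R : β → γ → Prop) (l : List α)
    (h : ∀ a ∈ l, (f a = none ∧ g a = none) ∨
        (∃ b c, f a = some b ∧ g a = some c ∧ R b c)) :
    List.Forall₂ R (l.filterMap f) (l.filterMap g) := by
  induction l with
  | nil => simp
  | cons a l ih =>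
    rcases h a (List.mem_cons_self ..) with ⟨hf, hg⟩ | ⟨b, c, hf, hg, hR⟩
    · rw [List.filterMap_cons_none hf, List.filterMap_cons_none hg]
      exact ih (fun x hx => h x (List.mem_cons_of_mem _ hx))
    · rw [List.filterMap_cons_some hf, List.filterMap_cons_some hg]
      exact List.Forall₂.cons hR (ih (fun x hx => h x (List.mem_cons_of_mem _ hx)))

theorem pv_entries_rel (walls bad_cells : List (List Int)) (c : Int × Int)
    (p : List (Int × Int)) (fa : Option String) (vis : PySem.Set (Int × Int))
    (h : (p = [] ∧ c = ((9 : Int), (5 : Int)) ∧ fa = none) ∨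
         (∃ h t, p = h :: t ∧ fa = pvDirOf h ∧ (pvDirOf h).isSome)) :
    List.Forall₂ pvR
      (((pvGetNeighbours c).filter (fun n =>
          !pvCellIn n walls && !pvCellIn n bad_cells && !PySem.Set.contains vis n)).map
        (fun n => (n, p ++ [n])))
      (pvActions.filterMap (fun ad =>
        let n : Int × Int := (c.1 + ad.2.1, c.2 + ad.2.2)
        if (0 ≤ n.1 ∧ n.1 < 11 ∧ 0 ≤ n.2 ∧ n.2 < 11) ∧
            ¬ walls.contains [n.1, n.2] = true ∧ ¬ bad_cells.contains [n.1, n.2] = true ∧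
            ¬ PySem.Set.contains vis n = true then
          some (n, some (match fa with | some s => s | none => ad.1))
        else none)) := by
  unfold pvGetNeighbours
  rw [List.filterMap_map, List.filter_filterMap, List.map_filterMap]
  apply pv_forall2_filterMap
  intro ad had
  by_cases hb : 0 ≤ c.1 + ad.2.1 ∧ c.1 + ad.2.1 < 11 ∧ 0 ≤ c.2 + ad.2.2 ∧ c.2 + ad.2.2 < 11
  · by_cases hw : (!pvCellIn (c.1 + ad.2.1, c.2 + ad.2.2) walls &&
        !pvCellIn (c.1 + ad.2.1, c.2 + ad.2.2) bad_cells &&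
        !PySem.Set.contains vis (c.1 + ad.2.1, c.2 + ad.2.2)) = true
    · refine Or.inr ⟨((c.1 + ad.2.1, c.2 + ad.2.2), p ++ [(c.1 + ad.2.1, c.2 + ad.2.2)]),
        ((c.1 + ad.2.1, c.2 + ad.2.2), some (fa.getD ad.1)),
        ?_, ?_, ?_⟩
      all_goals have hw' := hw
      all_goals rw [Bool.and_eq_true, Bool.and_eq_true, Bool.not_eq_true',
        Bool.not_eq_true', Bool.not_eq_true'] at hw'
      all_goals obtain ⟨⟨h1, h2⟩, h3⟩ := hw'
      · simp only [pvCellIn] at h1 h2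
        simp [Function.comp, Option.filter, pvCellIn, hb, PySem.Set.contains]
        exact ⟨by simpa using h1, by simpa using h2, by simpa using h3⟩
      · have hP : (0 ≤ c.1 + ad.2.1 ∧ c.1 + ad.2.1 < 11 ∧ 0 ≤ c.2 + ad.2.2 ∧ c.2 + ad.2.2 < 11) ∧
            ¬ walls.contains [c.1 + ad.2.1, c.2 + ad.2.2] = true ∧
            ¬ bad_cells.contains [c.1 + ad.2.1, c.2 + ad.2.2] = true ∧
            ¬ PySem.Set.contains vis (c.1 + ad.2.1, c.2 + ad.2.2) = true :=
          ⟨hb, by simp only [pvCellIn] at h1; simpa using h1,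
            by simp only [pvCellIn] at h2; simpa using h2,
            by simpa [PySem.Set.contains] using h3⟩
        show (if _ ∧ _ then _ else none) = _
        rw [if_pos hP]
        cases fa <;> rfl
      · rcases h with ⟨hp, hc, hfa⟩ | ⟨hh, ht, hp, hfa, hsome⟩
        · subst hp; subst hc; subst hfa
          refine ⟨rfl, Or.inr ⟨_, [], rfl, ?_, ?_⟩⟩ <;>
          · fin_cases had <;> decide
        · subst hp; subst hfa
          obtain ⟨s, hs⟩ := Option.isSome_iff_exists.mp hsome
          exact ⟨rfl, Or.inr ⟨hh, ht ++ [(c.1 + ad.2.1, c.2 + ad.2.2)], rfl, by simp [hs], hsome⟩⟩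
    · refine Or.inl ⟨?_, ?_⟩
      · simp [Function.comp, Option.filter, hb]
        intro h1 h2
        by_cases h3 : PySem.Set.contains vis (c.1 + ad.2.1, c.2 + ad.2.2) = true
        · simpa [PySem.Set.contains] using h3
        · exact absurd (pv_bool_iff.mpr ⟨by simp [h1], by simp [h2], h3⟩) hw
      · exact if_neg (fun hp => hw (pv_bool_iff.mpr (by simpa [pvCellIn] using hp.2)))
  · refine Or.inl ⟨?_, ?_⟩
    · simp only [Function.comp_apply, if_neg hb, Option.filter, Option.map_none]
    · exact if_neg (fun hp => hb hp.1)

theorem pv_forall2_append {α β : Type} {R : α → β → Prop} {a : List α} {b : List β}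
    {c : List α} {d : List β} (h1 : List.Forall₂ R a b) (h2 : List.Forall₂ R c d) :
    List.Forall₂ R (a ++ c) (b ++ d) := by
  induction h1 with
  | nil => simpa using h2
  | cons h _ ih => exact List.Forall₂.cons h ih

theorem pv_loop_rel (goal : List Int) (walls bad_cells : List (List Int)) :
    ∀ (fuel : Nat) (qA : List ((Int × Int) × List (Int × Int)))
      (qB : List ((Int × Int) × Option String)) (vis : PySem.Set (Int × Int)),
      List.Forall₂ pvR qA qB →
      (match pvBfsA goal walls bad_cells fuel qA vis with
        | [] => none
        | next :: _ => pvDirOf next) = pvBfsB goal walls bad_cells fuel qB vis := by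
  intro fuel
  induction fuel with
  | zero => intro qA qB vis _; simp [pvBfsA, pvBfsB]
  | succ f ih =>
    intro qA qB vis hq
    cases hq with
    | nil => simp [pvBfsA, pvBfsB]
    | @cons ea eb qA' qB' hR hrest =>
      obtain ⟨c, p⟩ := ea
      obtain ⟨c', fa⟩ := eb
      obtain ⟨hc, hinv⟩ := hR
      simp only at hc
      subst c'
      simp only [pvBfsA, pvBfsB]
      by_cases hg : [c.1, c.2] = goal
      · rw [if_pos hg, if_pos hg]
        rcases hinv with ⟨hp, _, hfa⟩ | ⟨hh, ht, hp, hfa, _⟩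
        · subst hp; subst hfa; rfl
        · subst hp; exact hfa.symm
      · rw [if_neg hg, if_neg hg]
        by_cases hv : PySem.Set.contains vis c = true
        · rw [if_pos hv, if_pos hv]; exact ih qA' qB' vis hrest
        · rw [if_neg hv, if_neg hv]
          apply ih
          exact pv_forall2_append hrest
            (pv_entries_rel walls bad_cells c p fa (PySem.Set.add vis c) hinv)

-- ===== VERDICT (by name: the statement is the Claim_ definition above) =====
theorem get_direction_to_goal_spec : Claim_equal_get_direction_to_goal := by
  intro goal walls bad_cells _
  unfold Spec_get_direction_to_goal get_direction_to_goal get_direction_to_goal_alt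
  have h := pv_loop_rel goal walls bad_cells 1000
    [(((9 : Int), (5 : Int)), [])] [(((9 : Int), (5 : Int)), none)] PySem.Set.empty
    (List.Forall₂.cons ⟨rfl, Or.inl ⟨rfl, rfl, rfl⟩⟩ List.Forall₂.nil)
  rw [← h]
  rfl
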